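-- pv_equiv track=rewrite | github.com/romquentin/DeepEpiX | src/callbacks/utils/performance_utils.py | compute_matches
-- ===== SOURCE A (Python) =====
-- def compute_matches(model_onsets, gt_onsets, delta):
--     model_onsets = list(model_onsets)
--     gt_onsets = list(gt_onsets)
--
--     true_positive = 0
--     false_positive = 0
--     false_negative = 0
--
--     matched_gt = set()
--     tp_distances = []
--     fp_distances = []
--     fn_distances = []
--
--     for m in model_onsets:
--         matched = False
--         for g in gt_onsets:
--             if abs(m - g) <= delta and g not in matched_gt:
--                 true_positive += 1
--                 matched_gt.add(g)
--                 tp_distances.append(abs(m - g))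
--                 matched = True
--                 break
--         if not matched:
--             false_positive += 1
--             # Distance to closest ground truth
--             closest_gt = min(gt_onsets, key=lambda g: abs(m - g)) if gt_onsets else None
--             if closest_gt is not None:
--                 fp_distances.append(abs(m - closest_gt))
--
--     for g in gt_onsets:
--         if g not in matched_gt:
--             false_negative += 1
--             # Distance to closest model prediction
--             closest_model = (
--                 min(model_onsets, key=lambda m: abs(m - g)) if model_onsets else None
--             )
--             if closest_model is not None:
--                 fn_distances.append(abs(g - closest_model))
--
--     return (
--         true_positive,
--         false_positive,
--         false_negative,
--         tp_distances,
--         fp_distances,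
--         fn_distances,
--     )
-- ===== SOURCE B (Python) =====
-- def compute_matches(model_onsets, gt_onsets, delta):
--     model_onsets = list(model_onsets)
--     gt_onsets = list(gt_onsets)
--     sorted_gt = sorted(gt_onsets)
--     sorted_model = sorted(model_onsets)
--
--     def bisect_left(s, x):
--         lo, hi = 0, len(s)
--         while lo < hi:
--             mid = (lo + hi) // 2
--             if s[mid] < x:
--                 lo = mid + 1
--             else:
--                 hi = mid
--         return lo
--
--     def nearest_dist(s, x):
--         # s sorted and non-empty: distance from x to its closest element
--         i = bisect_left(s, x)
--         if i == 0:
--             return s[0] - x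
--         if i == len(s):
--             return x - s[-1]
--         return min(s[i] - x, x - s[i - 1])
--
--     remaining = list(dict.fromkeys(gt_onsets))  # distinct gt values, first-seen order
--     matched = set()
--     tp = 0
--     fp = 0
--     tp_distances = []
--     fp_distances = []
--     for m in model_onsets:
--         hit = None
--         for g in remaining:
--             if abs(m - g) <= delta:
--                 hit = g
--                 break
--         if hit is None:
--             fp += 1
--             if sorted_gt:
--                 fp_distances.append(nearest_dist(sorted_gt, m))
--         else:
--             tp += 1
--             tp_distances.append(abs(m - hit))
--             matched.add(hit)
--             remaining.remove(hit)
--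
--     fn = 0
--     fn_distances = []
--     for g in gt_onsets:
--         if g not in matched:
--             fn += 1
--             if sorted_model:
--                 fn_distances.append(nearest_dist(sorted_model, g))
--     return (tp, fp, fn, tp_distances, fp_distances, fn_distances)
-- ===== Notes on version B (the rewrite author's own statement) =====
-- stated objective: alternative
-- what changed: B dedupes the ground-truth onsets once and scans a shrinking candidate list instead of rescanning all of gt with a matched-set test, and computes nearest-onset distances by binary search on pre-sorted copies instead of a min() scan per unmatched onset.
import Mathlib
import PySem

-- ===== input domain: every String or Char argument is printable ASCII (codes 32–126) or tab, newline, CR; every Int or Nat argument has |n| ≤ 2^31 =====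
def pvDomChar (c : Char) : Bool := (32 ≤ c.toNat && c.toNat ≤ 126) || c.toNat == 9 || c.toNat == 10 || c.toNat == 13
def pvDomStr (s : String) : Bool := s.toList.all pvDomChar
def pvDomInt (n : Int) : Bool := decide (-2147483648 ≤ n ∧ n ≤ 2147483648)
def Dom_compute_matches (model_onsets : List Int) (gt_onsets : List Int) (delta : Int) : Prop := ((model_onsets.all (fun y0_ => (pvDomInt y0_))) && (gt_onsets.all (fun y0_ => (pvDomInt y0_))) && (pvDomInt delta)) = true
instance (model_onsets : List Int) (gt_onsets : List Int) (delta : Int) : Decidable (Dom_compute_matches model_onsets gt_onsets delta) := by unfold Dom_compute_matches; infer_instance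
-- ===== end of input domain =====

-- B replaces A's rescan-all-of-gt greedy matching by a shrinking deduplicated candidate
-- list and replaces A's O(n) min-scans for nearest distances by binary search on
-- pre-sorted copies; objective: alternative/faster mechanism, same return value.

-- ===== PORT A =====
-- first pass: for each model onset, first gt onset within delta and not yet matched
def stepA1 (gt_onsets : List Int) (delta : Int)
    (st : Int × Int × PySem.Set Int × List Int × List Int) (m : Int) :
    Int × Int × PySem.Set Int × List Int × List Int :=
  match st with
  | (tp, fp, matched, tpd, fpd) =>
    match List.find? (fun g => decide (|m - g| ≤ delta) && !(PySem.Set.contains matched g)) gt_onsets with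
    | some g => (tp + 1, fp, PySem.Set.add matched g, tpd ++ [|m - g|], fpd)
    | none => (tp, fp + 1, matched, tpd,
        fpd ++ (match PySem.List.min? gt_onsets (fun g => |m - g|) with
                | some c => [|m - c|]
                | none => []))

-- second pass: unmatched gt onsets
def stepA2 (model_onsets : List Int) (matched : PySem.Set Int)
    (st : Int × List Int) (g : Int) : Int × List Int :=
  if PySem.Set.contains matched g then st
  else (st.1 + 1, st.2 ++ (match PySem.List.min? model_onsets (fun mm => |mm - g|) with
                           | some c => [|g - c|]
                           | none => []))

def compute_matches (model_onsets : List Int) (gt_onsets : List Int) (delta : Int) :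
    Int × Int × Int × List Int × List Int × List Int :=
  let st1 := model_onsets.foldl (stepA1 gt_onsets delta) (0, 0, PySem.Set.empty, [], [])
  match st1 with
  | (tp, fp, matched, tpd, fpd) =>
    let st2 := gt_onsets.foldl (stepA2 model_onsets matched) (0, [])
    (tp, fp, st2.1, tpd, fpd, st2.2)

-- ===== PORT B =====
-- hand-written bisect_left loop of Source B (no bisect import available to Source B);
-- the index mid always satisfies mid < s.length, so getD is exact for s[mid]
def pvBisectLoop (s : List Int) (x : Int) (lo hi : Nat) : Nat :=
  if _h : lo < hi then
    let mid := (lo + hi) / 2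
    if s.getD mid 0 < x then pvBisectLoop s x (mid + 1) hi
    else pvBisectLoop s x lo mid
  else lo
termination_by hi - lo
decreasing_by all_goals omega

-- nearest_dist of Source B: distance from x to closest element of sorted non-empty s
-- (indices 0, i-1, i, len-1 used only in range, so getD is exact; s[-1] = s[len-1])
def pvNearest (s : List Int) (x : Int) : Int :=
  let i := pvBisectLoop s x 0 s.length
  if i = 0 then s.getD 0 0 - x
  else if i = s.length then x - s.getD (s.length - 1) 0
  else min (s.getD i 0 - x) (x - s.getD (i - 1) 0)

-- first pass of Source B: scan the remaining (still unmatched) distinct gt values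
def stepB1 (sorted_gt : List Int) (delta : Int)
    (st : Int × Int × List Int × PySem.Set Int × List Int × List Int) (m : Int) :
    Int × Int × List Int × PySem.Set Int × List Int × List Int :=
  match st with
  | (tp, fp, remaining, matched, tpd, fpd) =>
    match List.find? (fun g => decide (|m - g| ≤ delta)) remaining with
    | none => (tp, fp + 1, remaining, matched, tpd,
        fpd ++ (if sorted_gt.isEmpty then [] else [pvNearest sorted_gt m]))
    | some g => (tp + 1, fp, remaining.erase g, PySem.Set.add matched g,
        tpd ++ [|m - g|], fpd)

-- second pass of Source B
def stepB2 (sorted_model : List Int) (matched : PySem.Set Int)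
    (st : Int × List Int) (g : Int) : Int × List Int :=
  if PySem.Set.contains matched g then st
  else (st.1 + 1, st.2 ++ (if sorted_model.isEmpty then [] else [pvNearest sorted_model g]))

def compute_matches_alt (model_onsets : List Int) (gt_onsets : List Int) (delta : Int) :
    Int × Int × Int × List Int × List Int × List Int :=
  let sorted_gt := PySem.List.sorted gt_onsets (fun y => y) false
  let sorted_model := PySem.List.sorted model_onsets (fun y => y) false
  let st1 := model_onsets.foldl (stepB1 sorted_gt delta)
      (0, 0, PySem.List.dedup gt_onsets, PySem.Set.empty, [], [])
  match st1 with
  | (tp, fp, _remaining, matched, tpd, fpd) =>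
    let st2 := gt_onsets.foldl (stepB2 sorted_model matched) (0, [])
    (tp, fp, st2.1, tpd, fpd, st2.2)

-- ===== PRECONDITION & SPEC =====
def Spec_compute_matches (model_onsets : List Int) (gt_onsets : List Int) (delta : Int) (out : Int × Int × Int × List Int × List Int × List Int) : Prop := out = compute_matches_alt model_onsets gt_onsets delta
instance (model_onsets : List Int) (gt_onsets : List Int) (delta : Int) (out : Int × Int × Int × List Int × List Int × List Int) : Decidable (Spec_compute_matches model_onsets gt_onsets delta out) := by unfold Spec_compute_matches; infer_instance

-- ===== CLAIM (what is proved, stated in full; the proofs are below) =====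
def Claim_equal_compute_matches : Prop := ∀ (model_onsets : List Int) (gt_onsets : List Int) (delta : Int), Dom_compute_matches model_onsets gt_onsets delta → Spec_compute_matches model_onsets gt_onsets delta (compute_matches model_onsets gt_onsets delta)

-- ===== LEMMAS AND PROOFS =====

-- skipping occurrences of one value the predicate rejects does not change find?
lemma pv_find?_filter_ne (p : Int → Bool) (x : Int) (hx : p x = false) :
    ∀ l : List Int, List.find? p (l.filter (fun y => !decide (y = x))) = List.find? p l := by
  intro l
  induction l with
  | nil => rfl
  | cons a t ih =>
    by_cases hax : a = x
    · subst hax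
      have h : List.filter (fun y => !decide (y = a)) (a :: t)
          = List.filter (fun y => !decide (y = a)) t := by simp
      rw [h, ih, List.find?_cons, hx]
    · have h : List.filter (fun y => !decide (y = x)) (a :: t)
          = a :: List.filter (fun y => !decide (y = x)) t := by simp [hax]
      rw [h, List.find?_cons, List.find?_cons]
      cases p a <;> simp [ih]

-- find? across a foldl of PySem.Set.add: the set collects first occurrences
lemma pv_find?_foldl_add (p : Int → Bool) :
    ∀ (l : List Int) (s : PySem.Set Int),
      List.find? p (l.foldl PySem.Set.add s)
        = (List.find? p s).or
            (List.find? p (l.filter (fun y => !(PySem.Set.contains s y)))) := by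
  intro l
  induction l with
  | nil => intro s; simp
  | cons a t ih =>
    intro s
    rw [List.foldl_cons, ih]
    by_cases has : a ∈ s
    · have h1 : PySem.Set.add s a = s := by simp [PySem.Set.add, PySem.Set.contains, has]
      have h2 : List.filter (fun y => !(PySem.Set.contains s y)) (a :: t)
          = List.filter (fun y => !(PySem.Set.contains s y)) t := by
        rw [List.filter_cons, if_neg (by simp [PySem.Set.contains, has])]
      rw [h1, h2]
    · have h1 : PySem.Set.add s a = s ++ [a] := by simp [PySem.Set.add, PySem.Set.contains, has]
      have h2 : List.filter (fun y => !(PySem.Set.contains s y)) (a :: t)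
          = a :: List.filter (fun y => !(PySem.Set.contains s y)) t := by
        rw [List.filter_cons, if_pos (by simp [PySem.Set.contains, has])]
      have h3 : List.filter (fun y => !(PySem.Set.contains (s ++ [a]) y)) t
          = (List.filter (fun y => !(PySem.Set.contains s y)) t).filter (fun y => !decide (y = a)) := by
        rw [List.filter_filter]
        congr 1
        funext y
        simp [PySem.Set.contains]
        rw [Bool.and_comm]
      rw [h1, h2, h3, List.find?_append, List.find?_cons, List.find?_cons]
      cases hpa : p a
      · rw [pv_find?_filter_ne p a hpa]
        simp
      · simp

-- duplicates never change the first hit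
lemma pv_find?_dedup (p : Int → Bool) (l : List Int) :
    List.find? p (PySem.List.dedup l) = List.find? p l := by
  have h : PySem.List.dedup l = l.foldl PySem.Set.add [] := by
    simp [PySem.Set.ofList_eq_foldl]
  rw [h, pv_find?_foldl_add]
  simp [PySem.Set.contains]

-- A's inner scan (all of gt, membership test) = B's scan of the remaining candidates
lemma pv_find_eq (gt_onsets : List Int) (delta m : Int) (matched : PySem.Set Int) :
    List.find? (fun g => decide (|m - g| ≤ delta) && !(PySem.Set.contains matched g)) gt_onsets
      = List.find? (fun g => decide (|m - g| ≤ delta))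
          ((PySem.List.dedup gt_onsets).filter (fun g => !(PySem.Set.contains matched g))) := by
  rw [List.find?_filter, pv_find?_dedup]
  congr 1
  funext g
  simp [Bool.and_comm]

-- bisect loop invariant on a monotone list
lemma pv_bisect_spec (s : List Int) (x : Int)
    (hmono : ∀ p q : Nat, p ≤ q → q < s.length → s.getD p 0 ≤ s.getD q 0) :
    ∀ (lo hi : Nat), lo ≤ hi → hi ≤ s.length →
      (∀ j, j < lo → s.getD j 0 < x) → (∀ j, hi ≤ j → j < s.length → x ≤ s.getD j 0) →
      lo ≤ pvBisectLoop s x lo hi ∧ pvBisectLoop s x lo hi ≤ hi ∧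
      (∀ j, j < pvBisectLoop s x lo hi → s.getD j 0 < x) ∧
      (∀ j, pvBisectLoop s x lo hi ≤ j → j < s.length → x ≤ s.getD j 0) := by
  intro lo hi
  fun_induction pvBisectLoop s x lo hi with
  | case1 lo hi h mid hlt ih =>
    intro hlohi hhil hbelow habove
    have hml : mid < s.length := by simp only [mid] at *; omega
    have hb2 : ∀ j, j < mid + 1 → s.getD j 0 < x := by
      intro j hj
      exact lt_of_le_of_lt (hmono j mid (by omega) hml) hlt
    have := ih (by simp only [mid] at *; omega) hhil hb2 habove
    refine ⟨?_, this.2.1, this.2.2.1, this.2.2.2⟩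
    have h1 := this.1
    simp only [mid] at h1 ⊢
    omega
  | case2 lo hi h mid hge ih =>
    intro hlohi hhil hbelow habove
    have hml : mid < s.length := by simp only [mid] at *; omega
    have ha2 : ∀ j, mid ≤ j → j < s.length → x ≤ s.getD j 0 := by
      intro j hj hjl
      exact le_trans (not_lt.mp hge) (hmono mid j hj hjl)
    have := ih (by simp only [mid] at *; omega) (by simp only [mid] at *; omega) hbelow ha2
    refine ⟨this.1, ?_, this.2.2.1, this.2.2.2⟩
    have h1 := this.2.1
    simp only [mid] at h1
    omega
  | case3 lo hi h =>
    intro hlohi hhil hbelow habove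
    have he : hi = lo := by omega
    subst he
    exact ⟨le_refl _, le_refl _, hbelow, habove⟩

-- pvNearest on the sorted copy computes exactly the minimal |x - v| over l
lemma pv_nearest_eq (l : List Int) (x c : Int)
    (hc : PySem.List.min? l (fun v => |x - v|) = some c) :
    |x - c| = pvNearest (PySem.List.sorted l (fun y => y) false) x := by
  have hperm := PySem.List.sorted_perm l (fun y => y) false
  set s := PySem.List.sorted l (fun y => y) false with hs
  have hmono : ∀ p q : Nat, p ≤ q → q < s.length → s.getD p 0 ≤ s.getD q 0 := by
    intro p q hpq hq
    rw [List.getD_eq_getElem s 0 (by omega), List.getD_eq_getElem s 0 hq]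
    exact PySem.List.sorted_id_getElem_mono l hpq (hs ▸ hq)
  have hcl : c ∈ l := PySem.List.min?_mem hc
  have hcs : c ∈ s := hperm.mem_iff.mpr hcl
  have hlen : 0 < s.length := List.length_pos_of_mem hcs
  obtain ⟨_, hile, hbelow, habove⟩ :=
    pv_bisect_spec s x hmono 0 s.length (by omega) (le_refl _)
      (by intro j hj; omega) (by intro j hj hjl; omega)
  have hmemD : ∀ j : Nat, j < s.length → s.getD j 0 ∈ l := by
    intro j hj
    rw [List.getD_eq_getElem s 0 hj]
    exact hperm.mem_iff.mp (List.getElem_mem hj)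
  have hminc : ∀ g ∈ l, |x - c| ≤ |x - g| := PySem.List.min?_isMin hc
  obtain ⟨k, hk, hck⟩ := List.mem_iff_getElem.mp hcs
  have hckD : s.getD k 0 = c := by rw [List.getD_eq_getElem s 0 hk]; exact hck
  have habs1 : ∀ a b : Int, a ≤ b → |a - b| = b - a := by
    intro a b h; rw [abs_of_nonpos (by omega)]; ring
  have habs2 : ∀ a b : Int, b ≤ a → |a - b| = a - b := by
    intro a b h; rw [abs_of_nonneg (by omega)]
  rw [pvNearest]
  set i := pvBisectLoop s x 0 s.length with hi
  split_ifs with h0 hn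
  · -- i = 0 : x is ≤ every element; nearest is s[0] - x
    have hx0 : x ≤ s.getD 0 0 := habove 0 (by omega) hlen
    have hxk : x ≤ s.getD k 0 := habove k (by omega) hk
    apply le_antisymm
    · have := hminc (s.getD 0 0) (hmemD 0 hlen)
      rw [habs1 x (s.getD 0 0) hx0] at this
      exact this
    · have h01 : s.getD 0 0 ≤ s.getD k 0 := hmono 0 k (by omega) hk
      rw [← hckD, habs1 x (s.getD k 0) hxk]
      omega
  · -- i = len : every element < x; nearest is x - s[len-1]
    have hlast : s.getD (s.length - 1) 0 < x := hbelow (s.length - 1) (by omega)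
    have hkx : s.getD k 0 < x := hbelow k (by omega)
    apply le_antisymm
    · have := hminc (s.getD (s.length - 1) 0) (hmemD (s.length - 1) (by omega))
      rw [habs2 x (s.getD (s.length - 1) 0) (le_of_lt hlast)] at this
      exact this
    · have h01 : s.getD k 0 ≤ s.getD (s.length - 1) 0 := hmono k (s.length - 1) (by omega) (by omega)
      rw [← hckD, habs2 x (s.getD k 0) (le_of_lt hkx)]
      omega
  · -- 0 < i < len : nearest is min of the two neighbours of the insertion point
    have hxi : x ≤ s.getD i 0 := habove i (le_refl _) (by omega)
    have hxi1 : s.getD (i - 1) 0 < x := hbelow (i - 1) (by omega)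
    apply le_antisymm
    · have hA := hminc (s.getD i 0) (hmemD i (by omega))
      have hB := hminc (s.getD (i - 1) 0) (hmemD (i - 1) (by omega))
      rw [habs1 x (s.getD i 0) hxi] at hA
      rw [habs2 x (s.getD (i - 1) 0) (le_of_lt hxi1)] at hB
      exact le_min hA hB
    · rw [← hckD]
      rcases le_or_gt i k with hik | hik
      · have h1 : s.getD i 0 ≤ s.getD k 0 := hmono i k hik hk
        have hxk : x ≤ s.getD k 0 := habove k hik hk
        rw [habs1 x (s.getD k 0) hxk]
        have := min_le_left (s.getD i 0 - x) (x - s.getD (i - 1) 0)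
        omega
      · have h1 : s.getD k 0 ≤ s.getD (i - 1) 0 := hmono k (i - 1) (by omega) (by omega)
        have hkx : s.getD k 0 < x := hbelow k (by omega)
        rw [habs2 x (s.getD k 0) (le_of_lt hkx)]
        have := min_le_right (s.getD i 0 - x) (x - s.getD (i - 1) 0)
        omega

-- the one-element list appended for an unmatched onset is the same in A and B
lemma pv_app_eq (l : List Int) (x : Int) :
    (match PySem.List.min? l (fun v => |x - v|) with
     | some c => [|x - c|] | none => ([] : List Int))
      = (if (PySem.List.sorted l (fun y => y) false).isEmpty then []
         else [pvNearest (PySem.List.sorted l (fun y => y) false) x]) := by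
  cases hm : PySem.List.min? l (fun v => |x - v|) with
  | none =>
    have hl : l = [] := (PySem.List.min?_eq_none_iff l _).mp hm
    subst hl
    simp [PySem.List.sorted]
  | some c =>
    have hl : l ≠ [] := by
      intro h; subst h; simp [PySem.List.min?] at hm
    have hs : (PySem.List.sorted l (fun y => y) false).isEmpty = false := by
      rw [List.isEmpty_eq_false_iff, ← List.length_pos_iff]
      rw [(PySem.List.sorted_perm l (fun y => y) false).length_eq, List.length_pos_iff]
      exact hl
    rw [hs]
    simp only [Bool.false_eq_true, if_false]
    rw [pv_nearest_eq l x c hm]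

-- removing the matched value from the candidate list = filtering by the grown set
lemma pv_filter_add (gt_onsets : List Int) (matched : PySem.Set Int) (g : Int)
    (hg : g ∉ matched) :
    ((PySem.List.dedup gt_onsets).filter (fun y => !(PySem.Set.contains matched y))).erase g
      = (PySem.List.dedup gt_onsets).filter
          (fun y => !(PySem.Set.contains (PySem.Set.add matched g) y)) := by
  rw [List.Nodup.erase_eq_filter ((PySem.List.nodup_dedup gt_onsets).filter _) g,
    List.filter_filter]
  congr 1
  funext y
  have hadd : PySem.Set.add matched g = matched ++ [g] := by
    simp [PySem.Set.add, PySem.Set.contains, hg]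
  rw [hadd]
  simp [PySem.Set.contains, bne]
  by_cases hyg : y = g <;> by_cases hym : y ∈ matched <;> simp [hyg, hym]

-- loop-1 correspondence: B's state is A's state plus the candidate list it encodes
lemma pv_loop1 (gt_onsets : List Int) (delta : Int) :
    ∀ (ms : List Int) (tp fp : Int) (matched : PySem.Set Int) (tpd fpd : List Int),
      ms.foldl (stepB1 (PySem.List.sorted gt_onsets (fun y => y) false) delta)
          (tp, fp, (PySem.List.dedup gt_onsets).filter (fun g => !(PySem.Set.contains matched g)),
           matched, tpd, fpd)
        = (let r := ms.foldl (stepA1 gt_onsets delta) (tp, fp, matched, tpd, fpd)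
           (r.1, r.2.1,
            (PySem.List.dedup gt_onsets).filter (fun g => !(PySem.Set.contains r.2.2.1 g)),
            r.2.2.1, r.2.2.2.1, r.2.2.2.2)) := by
  intro ms
  induction ms with
  | nil => intro tp fp matched tpd fpd; rfl
  | cons m t ih =>
    intro tp fp matched tpd fpd
    rw [List.foldl_cons, List.foldl_cons, stepB1, stepA1, ← pv_find_eq]
    cases hf : List.find? (fun g => decide (|m - g| ≤ delta) && !(PySem.Set.contains matched g)) gt_onsets with
    | none =>
      rw [pv_app_eq gt_onsets m]
      exact ih tp (fp + 1) matched tpd _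
    | some g =>
      have hp := List.find?_some hf
      have hgm : ¬ g ∈ matched := by
        simp [PySem.Set.contains] at hp
        exact hp.2
      simp only [pv_filter_add gt_onsets matched g hgm]
      exact ih (tp + 1) fp (PySem.Set.add matched g) (tpd ++ [|m - g|]) fpd

-- the second passes agree step by step
lemma pv_step2_eq (model_onsets : List Int) (matched : PySem.Set Int) :
    stepA2 model_onsets matched
      = stepB2 (PySem.List.sorted model_onsets (fun y => y) false) matched := by
  funext st g
  rw [stepA2, stepB2]
  by_cases hc : PySem.Set.contains matched g = true
  · rw [if_pos hc, if_pos hc]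
  · rw [if_neg hc, if_neg hc]
    have hkey : (fun mm => |mm - g|) = (fun mm => |g - mm|) := by
      funext mm; rw [abs_sub_comm]
    have happ : (match PySem.List.min? model_onsets (fun mm => |mm - g|) with
        | some c => [|g - c|] | none => ([] : List Int))
        = (if (PySem.List.sorted model_onsets (fun y => y) false).isEmpty then []
           else [pvNearest (PySem.List.sorted model_onsets (fun y => y) false) g]) := by
      rw [hkey]
      exact pv_app_eq model_onsets g
    rw [happ]

-- ===== VERDICT (by name: the statement is the Claim_ definition above) =====
theorem compute_matches_spec : Claim_equal_compute_matches := by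
  intro model_onsets gt_onsets delta _hdom
  unfold Spec_compute_matches
  simp only [compute_matches, compute_matches_alt]
  have hinit : PySem.List.dedup gt_onsets
      = (PySem.List.dedup gt_onsets).filter (fun g => !(PySem.Set.contains PySem.Set.empty g)) := by
    simp [PySem.Set.contains, PySem.Set.empty]
  rw [hinit, pv_loop1 gt_onsets delta model_onsets 0 0 PySem.Set.empty [] []]
  generalize List.foldl (stepA1 gt_onsets delta) (0, 0, PySem.Set.empty, [], []) model_onsets = r
  obtain ⟨tp, fp, matched, tpd, fpd⟩ := r
  rw [pv_step2_eq model_onsets matched]
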